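-- pv_equiv track=rewrite | github.com/mohitsshah/documents-caf | Table-Extraction/parseXMLForSegmentation.py | fetchText
-- ===== SOURCE A (Python) =====
-- def fetchText(textList):
--     currentX = textList[0][0]
--     text = ""
--     for tl in textList:
--         if tl[0] != currentX:
--             currentX = tl[0]
--             text += "\n"
--         text += tl[4]
--     return text
-- ===== SOURCE B (Python) =====
-- def fetchText(textList):
--     # Two-phase: cut the list into maximal runs of equal x, then join runs with newlines.
--     parts = []
--     i, n = 0, len(textList)
--     while i < n:
--         x = textList[i][0]
--         j = i
--         while j < n and textList[j][0] == x:
--             j += 1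
--         parts.append("".join(t[4] for t in textList[i:j]))
--         i = j
--     return "\n".join(parts)
-- ===== Notes on version B (the rewrite author's own statement) =====
-- stated objective: idiomatic
-- what changed: B replaces A's single pass that tracks currentX and emits a newline on change by a two-phase group-then-join: cut the list into maximal runs of equal x, join each run's strings, then join the runs with newlines.
import Mathlib
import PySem

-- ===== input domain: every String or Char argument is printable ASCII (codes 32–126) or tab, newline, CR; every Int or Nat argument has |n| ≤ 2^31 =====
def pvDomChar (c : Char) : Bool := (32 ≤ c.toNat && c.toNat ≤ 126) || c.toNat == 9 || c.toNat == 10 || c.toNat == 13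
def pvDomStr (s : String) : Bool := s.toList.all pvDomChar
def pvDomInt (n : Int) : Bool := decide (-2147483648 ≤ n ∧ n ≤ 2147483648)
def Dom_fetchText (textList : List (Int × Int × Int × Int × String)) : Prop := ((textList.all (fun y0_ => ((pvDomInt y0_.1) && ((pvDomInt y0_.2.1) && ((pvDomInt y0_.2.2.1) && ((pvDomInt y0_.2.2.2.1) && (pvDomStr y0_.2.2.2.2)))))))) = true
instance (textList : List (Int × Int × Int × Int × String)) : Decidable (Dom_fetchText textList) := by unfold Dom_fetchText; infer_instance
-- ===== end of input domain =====

-- B groups the rows into maximal runs of equal x and newline-joins the groups (two-phase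
-- group-then-join form) instead of A's single pass tracking currentX; return values proved
-- equal on every nonempty input (Pre_fetchText; the empty list makes A raise IndexError).

-- ===== PORT A =====
-- A's loop body: state (currentX, text); a newline is appended whenever x changes.
def fetchTextStep (st : Int × String) (tl : Int × Int × Int × Int × String) : Int × String :=
  if tl.1 ≠ st.1 then (tl.1, st.2 ++ "\n" ++ tl.2.2.2.2) else (st.1, st.2 ++ tl.2.2.2.2)

def fetchText (textList : List (Int × Int × Int × Int × String)) : String :=
  match textList with
  | [] => ""  -- Python raises IndexError here (textList[0][0]); excluded by Pre_fetchText
  | t0 :: _ => (textList.foldl fetchTextStep (t0.1, "")).2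

-- ===== PORT B =====
-- inner while of Source B: collect the strings of the maximal run with x-value `x`,
-- returning the run's strings and the remaining rows.
def collectRun (x : Int) : List (Int × Int × Int × Int × String) →
    List String × List (Int × Int × Int × Int × String)
  | [] => ([], [])
  | t :: rest =>
    if t.1 = x then
      let p := collectRun x rest
      (t.2.2.2.2 :: p.1, p.2)
    else ([], t :: rest)

theorem collectRun_snd_length_le (x : Int) (l : List (Int × Int × Int × Int × String)) :
    (collectRun x l).2.length ≤ l.length := by
  induction l with
  | nil => simp [collectRun]
  | cons t rest ih =>
    simp only [collectRun]
    split
    · exact Nat.le_succ_of_le ih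
    · simp

-- outer while of Source B: one "".join-ed string per maximal run.
def buildParts : List (Int × Int × Int × Int × String) → List String
  | [] => []
  | t :: rest =>
    let p := collectRun t.1 rest
    PySem.Str.join "" (t.2.2.2.2 :: p.1) :: buildParts p.2
termination_by l => l.length
decreasing_by
  exact Nat.lt_succ_of_le (collectRun_snd_length_le t.1 rest)

def fetchText_alt (textList : List (Int × Int × Int × Int × String)) : String :=
  PySem.Str.join "\n" (buildParts textList)

-- ===== PRECONDITION & SPEC =====
-- Pre_ excludes only the empty list, on which A raises IndexError.
def Pre_fetchText (textList : List (Int × Int × Int × Int × String)) : Prop := textList ≠ []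
instance (textList : List (Int × Int × Int × Int × String)) : Decidable (Pre_fetchText textList) := by unfold Pre_fetchText; infer_instance
def pvWitness_fetchText : (List (Int × Int × Int × Int × String)) := [(1, 0, 0, 0, "ab"), (1, 0, 0, 0, "c"), (2, 0, 0, 0, "d")]

def Spec_fetchText (textList : List (Int × Int × Int × Int × String)) (out : String) : Prop := out = fetchText_alt textList
instance (textList : List (Int × Int × Int × Int × String)) (out : String) : Decidable (Spec_fetchText textList out) := by unfold Spec_fetchText; infer_instance

-- ===== CLAIM (what is proved, stated in full; the proofs are below) =====
def Claim_equal_fetchText : Prop := ∀ (textList : List (Int × Int × Int × Int × String)), Dom_fetchText textList → Pre_fetchText textList → Spec_fetchText textList (fetchText textList)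

-- ===== LEMMAS AND PROOFS =====

theorem join_empty_cons (s : String) (rest : List String) :
    PySem.Str.join "" (s :: rest) = s ++ PySem.Str.join "" rest := by
  rw [← String.toList_inj]
  cases rest with
  | nil => simp [PySem.Str.toList_join, PySem.Chars.join_singleton, PySem.Chars.join_nil]
  | cons q qs =>
    simp [PySem.Str.toList_join, PySem.Chars.join_cons_cons]

theorem join_newline_cons (p : String) (ps : List String) :
    PySem.Str.join "\n" (p :: ps)
      = p ++ PySem.Str.join "" (ps.map (fun q => "\n" ++ q)) := by
  induction ps generalizing p with
  | nil => rw [← String.toList_inj]; simp [PySem.Str.toList_join, PySem.Chars.join_singleton, PySem.Chars.join_nil]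
  | cons q qs ih =>
    have h1 : PySem.Str.join "\n" (p :: q :: qs) = p ++ "\n" ++ PySem.Str.join "\n" (q :: qs) := by
      rw [← String.toList_inj]; simp [PySem.Str.toList_join, PySem.Chars.join_cons_cons]
    rw [h1, ih, List.map_cons, join_empty_cons]
    rw [← String.toList_inj]; simp

-- the text A's loop still produces when it continues from x-value `x`
def renderFrom (x : Int) (l : List (Int × Int × Int × Int × String)) : String :=
  PySem.Str.join "" (collectRun x l).1 ++
    PySem.Str.join "" ((buildParts (collectRun x l).2).map (fun p => "\n" ++ p))

theorem foldl_fetchTextStep (l : List (Int × Int × Int × Int × String)) :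
    ∀ (x : Int) (text : String),
      (l.foldl fetchTextStep (x, text)).2 = text ++ renderFrom x l := by
  induction l with
  | nil =>
    intro x text
    rw [← String.toList_inj]
    simp [renderFrom, collectRun, buildParts, PySem.Str.toList_join, PySem.Chars.join_nil]
  | cons t rest ih =>
    intro x text
    by_cases h : t.1 = x
    · rw [List.foldl_cons, show fetchTextStep (x, text) t = (x, text ++ t.2.2.2.2) by
        simp [fetchTextStep, h]]
      rw [ih x (text ++ t.2.2.2.2)]
      simp only [renderFrom, collectRun, if_pos h, join_empty_cons]
      rw [← String.toList_inj]; simp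
    · rw [List.foldl_cons, show fetchTextStep (x, text) t = (t.1, text ++ "\n" ++ t.2.2.2.2) by
        simp [fetchTextStep, h]]
      rw [ih t.1 (text ++ "\n" ++ t.2.2.2.2)]
      simp only [renderFrom, collectRun, if_neg h, buildParts, List.map_cons, join_empty_cons]
      rw [← String.toList_inj]
      simp [PySem.Str.toList_join, PySem.Chars.join_nil]

-- ===== VERDICT (by name: the statement is the Claim_ definition above) =====
theorem fetchText_spec : Claim_equal_fetchText := by
  intro textList _ hpre
  unfold Spec_fetchText
  match textList with
  | [] => exact absurd rfl hpre
  | t :: rest =>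
    show fetchText (t :: rest) = fetchText_alt (t :: rest)
    rw [show fetchText (t :: rest) = ((t :: rest).foldl fetchTextStep (t.1, "")).2 from rfl,
      List.foldl_cons, show fetchTextStep (t.1, "") t = (t.1, "" ++ t.2.2.2.2) by
        simp [fetchTextStep]]
    rw [foldl_fetchTextStep]
    simp only [fetchText_alt, buildParts]
    rw [join_newline_cons, join_empty_cons]
    rw [← String.toList_inj]
    simp [renderFrom]
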